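-- pv_equiv track=rewrite | github.com/yuu-eguci/problems | (2017-11-06)逆Fizzbuzz問題/reverse_fizzbuzz.py | zzubzzif
-- ===== SOURCE A (Python) =====
-- FIZZ = 'fizz'
--
-- BUZZ = 'buzz'
--
-- def zzubzzif(lis):
--
--     # 引数lisの個数を求めます。
--     length = len(lis)
--     if length == 0:
--         return []
--
--     # 1~15のfizzbuzzを用意します(1行fizzbuzz)。数字の部分はNoneにしときます。
--     # あとlisの個数に合わせてfizzbuzzを伸ばしときます。1個:パターン1周でOK 2〜8:2周 9〜15:3周。
--     import math
--     fbs = list(map(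
--         lambda i: None if (i % 3 and i % 5)
--         else ('' if i % 3 else FIZZ) + ('' if i % 5 else BUZZ),
--         range(1, 16)
--     )) * (1 + math.ceil((length - 1) / 7))
--
--     # 今から求めるのは、一致するfizzbuzzの開始位置と、連続数列の長さです。
--     fixed_start_index = None
--     fixed_fbs_num = len(fbs)
--
--     # まず開始位置を求めます。
--     for start_index in range(len(fbs) - length + 1):
--
--         # 空欄だったり、しょっぱなから一致しなかったらスキップです。
--         if fbs[start_index] == None or fbs[start_index] != lis[0]:
--             continue
--
--         # 開始位置が決定したら以降のfizzbuzz並びを見ます。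
--         lis_num = 0  # lis[0]からの距離。範囲は0〜(length-1)
--         fbs_num = 0  # fbs[start_index]からの距離。範囲は0〜(len(fbs)-start_index-1)
--         while fbs_num < (len(fbs) - start_index):
--
--             # 空欄はスキップです。
--             if fbs[start_index + fbs_num] is None:
--                 fbs_num += 1
--                 continue
--
--             # 一致しなければ今回のstart_indexはアウト。
--             if fbs[start_index + fbs_num] != lis[lis_num]:
--                 break
--
--             # 一致した! 次のチェックにいこう。
--             lis_num += 1
--             fbs_num += 1
--
--             # え? もうlis終わり? じゃあ全部一致したってことだねおめでとう。
--             if lis_num == length: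
--
--                 # ただしfixするのは、fbs_numがこれまでで一番短ければだ。
--                 if fbs_num < fixed_fbs_num:
--                     fixed_fbs_num = fbs_num
--                     fixed_start_index = start_index
--                 break
--
--     # さて結果は出たのかな?
--     if fixed_start_index is None:
--         return []
--
--     # fixed_start_point+1の数字からfixed_fbs_numの距離の連続数列が答え。
--     result = []
--     for i in range(fixed_start_index + 1, fixed_start_index + 1 + fixed_fbs_num):
--         result.append(i)
--
--     return result
-- ===== SOURCE B (Python) =====
-- FIZZ = 'fizz'
--
-- BUZZ = 'buzz'
--
-- def zzubzzif(lis):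
--     # Exploits the period-15 structure of fizzbuzz: only the 15 start offsets of
--     # the first period need testing, matching against the infinite periodic
--     # pattern via an index taken mod 15 (blanks come at most two in a row).
--     if not lis:
--         return []
--     cycle = [None if (i % 3 and i % 5)
--              else ('' if i % 3 else FIZZ) + ('' if i % 5 else BUZZ)
--              for i in range(1, 16)]
--     best_len = None
--     best_start = None
--     for o in range(15):
--         if cycle[o] is None:
--             continue
--         j = o
--         ok = True
--         for x in lis:
--             if cycle[j % 15] is None:  # skip a blank (a number slot)
--                 j += 1
--             if cycle[j % 15] is None:  # at most two blanks in a row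
--                 j += 1
--             if cycle[j % 15] != x:
--                 ok = False
--                 break
--             j += 1
--         if ok and (best_len is None or j - o < best_len):
--             best_len = j - o
--             best_start = o
--     if best_start is None:
--         return []
--     return list(range(best_start + 1, best_start + 1 + best_len))
-- ===== Notes on version B (the rewrite author's own statement) =====
-- stated objective: faster
-- what changed: Instead of scanning all ~2n start positions of an n-proportional replicated fizzbuzz list, B tests only the 15 start offsets of one period and matches against the infinite periodic pattern via an index mod 15, exploiting the period-15 repetition.
import Mathlib
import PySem

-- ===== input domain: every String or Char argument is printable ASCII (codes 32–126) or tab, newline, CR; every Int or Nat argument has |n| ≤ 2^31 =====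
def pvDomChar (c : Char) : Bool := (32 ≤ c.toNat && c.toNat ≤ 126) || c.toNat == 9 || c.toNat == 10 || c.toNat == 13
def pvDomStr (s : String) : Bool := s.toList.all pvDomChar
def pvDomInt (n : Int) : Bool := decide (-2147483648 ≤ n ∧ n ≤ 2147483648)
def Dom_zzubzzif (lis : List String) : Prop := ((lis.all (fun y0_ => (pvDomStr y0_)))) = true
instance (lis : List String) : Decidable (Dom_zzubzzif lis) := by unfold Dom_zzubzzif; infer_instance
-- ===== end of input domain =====

-- B replaces A's scan over every start position of the length-proportional replicated
-- fizzbuzz list by a scan over the 15 offsets of one period (pattern indexed mod 15);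
-- a timing run measured B faster.

-- ===== PORT A =====
-- the one-period fizzbuzz line, numbers as `none` (list(map(lambda i: ..., range(1,16))))
def fbsBase : List (Option String) :=
  (List.range 15).map (fun k =>
    let i := k + 1
    if i % 3 ≠ 0 ∧ i % 5 ≠ 0 then none
    else some ((if i % 3 = 0 then "fizz" else "") ++ (if i % 5 = 0 then "buzz" else "")))

-- the inner `while fbs_num < (len(fbs) - start_index)` loop; fuel = len(fbs) - start - fbs_num
def innerGoA (fbs : List (Option String)) (lis : List String) (start : Nat) :
    Nat → Nat → Nat → Option Nat
  | _, _, 0 => none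
  | fbsNum, lisNum, fuel + 1 =>
    match fbs.getD (start + fbsNum) none with
    | none => innerGoA fbs lis start (fbsNum + 1) lisNum fuel
    | some w =>
      if w ≠ lis.getD lisNum "" then none
      else if lisNum + 1 = lis.length then some (fbsNum + 1)
      else innerGoA fbs lis start (fbsNum + 1) (lisNum + 1) fuel

-- one iteration of `for start_index in range(...)`, state = (fixed_start_index, fixed_fbs_num)
def stepA (fbs : List (Option String)) (lis : List String) (st : Option Nat × Nat) (s : Nat) :
    Option Nat × Nat :=
  match fbs.getD s none with
  | none => st
  | some w =>
    if w ≠ lis.getD 0 "" then st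
    else
      match innerGoA fbs lis s 0 0 (fbs.length - s) with
      | none => st
      | some v => if v < st.2 then (some s, v) else st

def zzubzzif (lis : List String) : List Int :=
  if lis.length = 0 then []
  else
    let m := 1 + (lis.length - 1 + 6) / 7          -- 1 + math.ceil((length - 1) / 7)
    let fbs := (List.replicate m fbsBase).flatten  -- list * int
    let st := (List.range (fbs.length - lis.length + 1)).foldl (stepA fbs lis) (none, fbs.length)
    match st.1 with
    | none => []
    | some fs => PySem.List.pyRange ((fs : Int) + 1) ((fs : Int) + 1 + (st.2 : Int)) 1

-- ===== PORT B =====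
def cycleB : List (Option String) :=
  (List.range 15).map (fun k =>
    let i := k + 1
    if i % 3 ≠ 0 ∧ i % 5 ≠ 0 then none
    else some ((if i % 3 = 0 then "fizz" else "") ++ (if i % 5 = 0 then "buzz" else "")))

-- the `for x in lis` loop of B: j walks the periodic pattern (index mod 15),
-- skipping at most two blanks per element; returns the final j on a full match
def goB (j : Nat) (lis : List String) : Option Nat :=
  match lis with
  | [] => some j
  | x :: r =>
    let j1 := if cycleB.getD (j % 15) none = none then j + 1 else j
    let j2 := if cycleB.getD (j1 % 15) none = none then j1 + 1 else j1
    if cycleB.getD (j2 % 15) none = some x then goB (j2 + 1) r else none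

-- one iteration of `for o in range(15)`, state = (best_len, best_start)
def stepB (lis : List String) (st : Option Nat × Option Nat) (o : Nat) :
    Option Nat × Option Nat :=
  if cycleB.getD o none = none then st
  else
    match goB o lis with
    | none => st
    | some j =>
      let run := j - o
      match st.1 with
      | none => (some run, some o)
      | some bl => if run < bl then (some run, some o) else st

def zzubzzif_alt (lis : List String) : List Int :=
  if lis.isEmpty then []
  else
    let st := (List.range 15).foldl (stepB lis) (none, none)
    match st.2, st.1 with
    | some o, some bl => PySem.List.pyRange ((o : Int) + 1) ((o : Int) + 1 + (bl : Int)) 1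
    | _, _ => []

-- ===== PRECONDITION & SPEC =====
def Spec_zzubzzif (lis : List String) (out : List Int) : Prop := out = zzubzzif_alt lis
instance (lis : List String) (out : List Int) : Decidable (Spec_zzubzzif lis out) := by
  unfold Spec_zzubzzif; infer_instance

-- ===== CLAIM (what is proved, stated in full; the proofs are below) =====
def Claim_equal_zzubzzif : Prop := ∀ (lis : List String), Dom_zzubzzif lis → Spec_zzubzzif lis (zzubzzif lis)

-- ===== LEMMAS AND PROOFS =====

theorem fbsBase_eq : fbsBase = cycleB := rfl

theorem cycleB_len : cycleB.length = 15 := by decide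

def Fcnt (j : Nat) : Nat :=
  (List.range j).countP (fun k => (cycleB.getD (k % 15) none).isSome)
theorem Fcnt_succ (j : Nat) :
    Fcnt (j + 1) = Fcnt j + (if (cycleB.getD (j % 15) none).isSome then 1 else 0) := by
  simp [Fcnt, List.range_succ, List.countP_append, List.countP_cons]
theorem Fcnt_mono {i j : Nat} (h : i ≤ j) : Fcnt i ≤ Fcnt j := by
  induction j with
  | zero => have : i = 0 := by omega
            simp [this]
  | succ j ih =>
    rcases Nat.lt_or_ge i (j+1) with h' | h'
    · have := Fcnt_succ j
      have := ih (by omega)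
      omega
    · have hij : i = j + 1 := by omega
      simp [hij]
theorem Fcnt_add15 (j : Nat) : Fcnt (j + 15) = Fcnt j + 7 := by
  induction j with
  | zero => simp [Fcnt]; decide
  | succ j ih =>
    have h1 := Fcnt_succ j
    have h2 := Fcnt_succ (j + 15)
    have h3 : (j + 1 + 15) = (j + 15) + 1 := by omega
    have h4 : (j + 15) % 15 = j % 15 := by omega
    rw [h3, h2, h4]
    omega
theorem Fcnt_mul15 (m : Nat) : Fcnt (15 * m) = 7 * m := by
  induction m with
  | zero => simp [Fcnt]
  | succ m ih =>
    have : 15 * (m + 1) = 15 * m + 15 := by ring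
    rw [this, Fcnt_add15, ih]; ring
theorem cycle0 : cycleB.getD (0 % 15) none = none := by decide
theorem no3 (j : Nat) (h0 : cycleB.getD (j % 15) none = none)
    (h1 : cycleB.getD ((j + 1) % 15) none = none) :
    cycleB.getD ((j + 2) % 15) none ≠ none := by
  have hr : j % 15 < 15 := Nat.mod_lt _ (by omega)
  have e1 : (j + 1) % 15 = (j % 15 + 1) % 15 := by omega
  have e2 : (j + 2) % 15 = (j % 15 + 2) % 15 := by omega
  rw [e1] at h1; rw [e2]
  revert h0 h1
  generalize j % 15 = r at hr
  interval_cases r <;> decide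
-- proof helper: the position goB's two blank-skipping ifs land on
def skip1 (j : Nat) : Nat := if cycleB.getD (j % 15) none = none then j + 1 else j
def skip2 (j : Nat) : Nat := skip1 (skip1 j)

theorem goB_unfold (j : Nat) (x : String) (r : List String) :
    goB j (x :: r) =
      (if cycleB.getD (skip2 j % 15) none = some x then goB (skip2 j + 1) r else none) := rfl

theorem skip2_ge (j : Nat) : j ≤ skip2 j ∧ skip2 j ≤ j + 2 := by
  unfold skip2 skip1
  split_ifs <;> omega

theorem skip2_shift (j : Nat) : skip2 (j + 15) = skip2 j + 15 := by
  unfold skip2 skip1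
  have e0 : (j + 15) % 15 = j % 15 := by omega
  have e1 : (j + 1 + 15) % 15 = (j + 1) % 15 := by omega
  have e2 : j + 15 + 1 = j + 1 + 15 := by omega
  rw [e0, e2]
  by_cases h0 : cycleB.getD (j % 15) none = none
  · simp only [if_pos h0]
    rw [e1]
    split_ifs <;> omega
  · simp only [if_neg h0]
    rw [e0]
    simp only [if_neg h0]
theorem skip2_id (j : Nat) (h : cycleB.getD (j % 15) none ≠ none) : skip2 j = j := by
  unfold skip2 skip1
  simp only [if_neg h]

theorem skip2_skip (j : Nat) (h : cycleB.getD (j % 15) none = none) :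
    skip2 (j + 1) = skip2 j := by
  unfold skip2 skip1
  simp only [if_pos h]
  by_cases h1 : cycleB.getD ((j + 1) % 15) none = none
  · simp only [if_pos h1]
    have e : j + 1 + 1 = j + 2 := by omega
    rw [e]
    have h2 : ¬ cycleB.getD ((j + 2) % 15) none = none := no3 j h h1
    simp only [if_neg h2]
  · simp only [if_neg h1]
theorem skip2_Fcnt (j : Nat) : Fcnt (skip2 j) = Fcnt j := by
  unfold skip2 skip1
  by_cases h0 : cycleB.getD (j % 15) none = none
  · simp only [if_pos h0]
    have f1 : Fcnt (j + 1) = Fcnt j := by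
      have := Fcnt_succ j
      rw [h0] at this
      simpa using this
    by_cases h1 : cycleB.getD ((j + 1) % 15) none = none
    · simp only [if_pos h1]
      have := Fcnt_succ (j + 1)
      rw [h1] at this
      simp at this
      omega
    · simp only [if_neg h1]
      exact f1
  · simp only [if_neg h0]
theorem goB_skip (j : Nat) (x : String) (r : List String)
    (h : cycleB.getD (j % 15) none = none) :
    goB j (x :: r) = goB (j + 1) (x :: r) := by
  rw [goB_unfold, goB_unfold, skip2_skip j h]

theorem goB_shift (lis : List String) : ∀ j, goB (j + 15) lis = (goB j lis).map (· + 15) := by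
  induction lis with
  | nil => intro j; simp [goB]
  | cons x r ih =>
    intro j
    rw [goB_unfold, goB_unfold, skip2_shift]
    have e : (skip2 j + 15) % 15 = skip2 j % 15 := by omega
    rw [e]
    by_cases hc : cycleB.getD (skip2 j % 15) none = some x
    · simp only [if_pos hc]
      have e2 : skip2 j + 15 + 1 = skip2 j + 1 + 15 := by omega
      rw [e2, ih]
    · simp only [if_neg hc, Option.map_none]


theorem goB_shift_mul (lis : List String) (q : Nat) :
    ∀ j, goB (j + 15 * q) lis = (goB j lis).map (· + 15 * q) := by
  induction q with
  | zero => intro j; cases goB j lis <;> simp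
  | succ q ih =>
    intro j
    have e : j + 15 * (q + 1) = (j + 15 * q) + 15 := by ring
    rw [e, goB_shift, ih]
    cases goB j lis <;> simp <;> ring

theorem goB_cons (j : Nat) (x : String) (r : List String) (f : Nat)
    (h : goB j (x :: r) = some f) :
    Fcnt (skip2 j) = Fcnt j ∧ j ≤ skip2 j ∧
      cycleB.getD (skip2 j % 15) none = some x ∧ goB (skip2 j + 1) r = some f := by
  rw [goB_unfold] at h
  by_cases hc : cycleB.getD (skip2 j % 15) none = some x
  · rw [if_pos hc] at h
    exact ⟨skip2_Fcnt j, (skip2_ge j).1, hc, h⟩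
  · rw [if_neg hc] at h
    exact absurd h (by simp)

theorem go_spec (lis : List String) : ∀ j f, goB j lis = some f →
    j ≤ f ∧ Fcnt f = Fcnt j + lis.length ∧
    (lis ≠ [] → j < f ∧ (cycleB.getD ((f - 1) % 15) none).isSome) := by
  induction lis with
  | nil =>
    intro j f h
    simp [goB] at h
    subst h
    simp
  | cons x r ih =>
    intro j f h
    obtain ⟨hF, hge, hsome, hrec⟩ := goB_cons j x r f h
    have hFs : Fcnt (skip2 j + 1) = Fcnt (skip2 j) + 1 := by
      have := Fcnt_succ (skip2 j)
      rw [hsome] at this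
      simpa using this
    cases r with
    | nil =>
      simp [goB] at hrec
      subst hrec
      refine ⟨by omega, ?_, ?_⟩
      · simp
        omega
      · intro _
        constructor
        · omega
        · have e : skip2 j + 1 - 1 = skip2 j := by omega
          rw [e, hsome]
          simp
    | cons y r' =>
      obtain ⟨h1, h2, h3⟩ := ih (skip2 j + 1) f hrec
      have h4 := h3 (by simp)
      refine ⟨by omega, ?_, ?_⟩
      · simp only [List.length_cons] at h2 ⊢
        omega
      · intro _
        exact ⟨by omega, h4.2⟩

theorem Fcnt14 : Fcnt 14 = 6 := by decide

theorem room (lis : List String) (o f : Nat) (hL : 1 ≤ lis.length) (ho : o ≤ 14)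
    (h : goB o lis = some f) : f ≤ 15 * (1 + (lis.length - 1 + 6) / 7) := by
  set L := lis.length with hLdef
  set m := 1 + (L - 1 + 6) / 7 with hm
  by_contra hgt
  push_neg at hgt
  have hne : lis ≠ [] := List.ne_nil_of_length_pos (by omega)
  obtain ⟨hof, hF, hlast⟩ := go_spec lis o f h
  obtain ⟨hlt, hsome⟩ := hlast hne
  have hmono : Fcnt (15 * m) ≤ Fcnt (f - 1) := Fcnt_mono (by omega)
  have hFm : Fcnt (15 * m) = 7 * m := Fcnt_mul15 m
  have hstep : Fcnt f = Fcnt (f - 1) + 1 := by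
    have := Fcnt_succ (f - 1)
    have e : f - 1 + 1 = f := by omega
    rw [e] at this
    rw [this, if_pos hsome]
  have ho6 : Fcnt o ≤ 6 := by
    calc Fcnt o ≤ Fcnt 14 := Fcnt_mono ho
    _ = 6 := Fcnt14
  have hdiv : 7 * ((L - 1 + 6) / 7) + (L - 1 + 6) % 7 = L - 1 + 6 := Nat.div_add_mod _ 7
  have hmod : (L - 1 + 6) % 7 < 7 := Nat.mod_lt _ (by omega)
  omega

theorem flatten_len (m : Nat) : ((List.replicate m cycleB).flatten).length = 15 * m := by
  simp [List.length_flatten, cycleB_len, Nat.mul_comm]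

theorem flatten_getD (m : Nat) : ∀ i, i < 15 * m →
    ((List.replicate m cycleB).flatten).getD i none = cycleB.getD (i % 15) none := by
  induction m with
  | zero => intro i hi; omega
  | succ m ih =>
    intro i hi
    rw [List.replicate_succ, List.flatten_cons]
    by_cases h15 : i < 15
    · rw [List.getD_append _ _ _ _ (by rw [cycleB_len]; omega)]
      rw [Nat.mod_eq_of_lt h15]
    · have e : i % 15 = (i - 15) % 15 := by omega
      rw [List.getD_append_right _ _ _ _ (by rw [cycleB_len]; omega)]
      rw [cycleB_len, e]
      exact ih (i - 15) (by omega)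

theorem inner_eq (lis : List String) (m start : Nat) :
    ∀ n j lisNum, j + n = 15 * m → start ≤ j → lisNum < lis.length →
    innerGoA ((List.replicate m cycleB).flatten) lis start (j - start) lisNum n =
      (match goB j (lis.drop lisNum) with
       | some f => if f ≤ 15 * m then some (f - start) else none
       | none => none) := by
  intro n
  induction n with
  | zero =>
    intro j lisNum hjn hsj hln
    have hj : j = 15 * m := by omega
    have hd : lis.drop lisNum = lis[lisNum] :: lis.drop (lisNum + 1) :=
      List.drop_eq_getElem_cons hln
    rw [hd]
    cases hg : goB j (lis[lisNum] :: lis.drop (lisNum + 1)) with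
    | none => simp [innerGoA]
    | some f =>
      have hne' : lis[lisNum] :: lis.drop (lisNum + 1) ≠ [] := List.cons_ne_nil _ _
      have := (go_spec _ j f hg).2.2 hne' 
      have hf : ¬ f ≤ 15 * m := by omega
      simp [innerGoA, hf]
  | succ n ih =>
    intro j lisNum hjn hsj hln
    have hjm : j < 15 * m := by omega
    have e : start + (j - start) = j := by omega
    have hget : ((List.replicate m cycleB).flatten).getD j none = cycleB.getD (j % 15) none :=
      flatten_getD m j hjm
    have hd : lis.drop lisNum = lis[lisNum] :: lis.drop (lisNum + 1) :=
      List.drop_eq_getElem_cons hln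
    have hgetD : lis.getD lisNum "" = lis[lisNum] := List.getD_eq_getElem lis "" hln
    rw [hd]
    cases hc : cycleB.getD (j % 15) none with
    | none =>
      have lhs : innerGoA ((List.replicate m cycleB).flatten) lis start (j - start) lisNum (n + 1)
          = innerGoA ((List.replicate m cycleB).flatten) lis start (j - start + 1) lisNum n := by
        simp only [innerGoA, e, hget, hc]
      have e2 : j - start + 1 = (j + 1) - start := by omega
      rw [lhs, e2, ih (j + 1) lisNum (by omega) (by omega) hln, hd]
      rw [goB_skip j _ _ hc]
    | some w =>
      have hsid : skip2 j = j := skip2_id j (by rw [hc]; simp)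
      have hrhs : goB j (lis[lisNum] :: lis.drop (lisNum + 1)) =
          (if cycleB.getD (j % 15) none = some lis[lisNum]
           then goB (j + 1) (lis.drop (lisNum + 1)) else none) := by
        rw [goB_unfold, hsid]
      by_cases hx : w = lis[lisNum]
      · subst hx
        have lhs : innerGoA ((List.replicate m cycleB).flatten) lis start (j - start) lisNum (n + 1)
            = (if lisNum + 1 = lis.length then some (j - start + 1)
               else innerGoA ((List.replicate m cycleB).flatten) lis start (j - start + 1) (lisNum + 1) n) := by
          simp only [innerGoA, e, hget, hc, hgetD]
          simp
        rw [lhs, hrhs, hc, if_pos rfl]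
        by_cases hend : lisNum + 1 = lis.length
        · rw [if_pos hend]
          have hdrop : lis.drop (lisNum + 1) = [] := by
            rw [List.drop_eq_nil_iff]
            omega
          rw [hdrop]
          simp only [goB]
          have : j + 1 ≤ 15 * m := by omega
          rw [if_pos this]
          have : j + 1 - start = j - start + 1 := by omega
          rw [this]
        · rw [if_neg hend]
          have hln2 : lisNum + 1 < lis.length := by omega
          have e2 : j - start + 1 = (j + 1) - start := by omega
          rw [e2, ih (j + 1) (lisNum + 1) (by omega) (by omega) hln2]
      · have lhs : innerGoA ((List.replicate m cycleB).flatten) lis start (j - start) lisNum (n + 1)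
            = none := by
          simp only [innerGoA, e, hget, hc, hgetD]
          simp [hx]
        rw [lhs, hrhs, hc]
        have : ¬ (some w = some lis[lisNum]) := by simp [hx]
        rw [if_neg this]

def AV (lis : List String) (m s : Nat) : Option Nat :=
  match ((List.replicate m cycleB).flatten).getD s none with
  | none => none
  | some w =>
    if w ≠ lis.getD 0 "" then none
    else innerGoA ((List.replicate m cycleB).flatten) lis s 0 0
          (((List.replicate m cycleB).flatten).length - s)

theorem stepA_eq (lis : List String) (m : Nat) (st : Option Nat × Nat) (s : Nat) :
    stepA ((List.replicate m cycleB).flatten) lis st s =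
      match AV lis m s with
      | none => st
      | some v => if v < st.2 then (some s, v) else st := by
  unfold stepA AV
  cases ((List.replicate m cycleB).flatten).getD s none with
  | none => rfl
  | some w =>
    dsimp only
    by_cases hw : w ≠ lis.getD 0 ""
    · rw [if_pos hw, if_pos hw]
    · rw [if_neg hw, if_neg hw]

theorem AV_char (lis : List String) (m s : Nat) (hs : s < 15 * m)
    (hL : 1 ≤ lis.length) :
    AV lis m s =
      match cycleB.getD (s % 15) none with
      | none => none
      | some _ =>
        match goB s lis with
        | some f => if f ≤ 15 * m then some (f - s) else none
        | none => none := by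
  unfold AV
  rw [flatten_getD m s hs]
  cases hc : cycleB.getD (s % 15) none with
  | none => rfl
  | some w =>
    dsimp only
    have h0 : 0 < lis.length := hL
    have hlen : ((List.replicate m cycleB).flatten).length = 15 * m := flatten_len m
    have hinner := inner_eq lis m s (15 * m - s) s 0 (by omega) (by omega) h0
    have es : s - s = 0 := by omega
    rw [es] at hinner
    rw [hlen]
    have hd0 : lis.drop 0 = lis := List.drop_zero
    rw [hd0] at hinner
    have hget0 : lis.getD 0 "" = lis[0] := List.getD_eq_getElem lis "" h0
    have hd : lis = lis[0] :: lis.drop 1 := by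
      conv_lhs => rw [← hd0]
      exact List.drop_eq_getElem_cons h0
    by_cases hw : w = lis.getD 0 ""
    · have hnw : ¬ (w ≠ lis.getD 0 "") := by simp [hw]
      rw [if_neg hnw]
      exact hinner
    · rw [if_pos hw]
      have hgnone : goB s lis = none := by
        conv_lhs => rw [hd]
        rw [goB_unfold, skip2_id s (by rw [hc]; simp), hc]
        have : ¬ (some w = some lis[0]) := by
          simp only [Option.some_inj]
          rw [← hget0]
          exact hw
        rw [if_neg this]
      rw [hgnone]


def RelAB (m : Nat) (a : Option Nat × Nat) (b : Option Nat × Option Nat) : Prop :=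
  (a = (none, 15 * m) ∧ b = (none, none)) ∨
  (∃ o v, a = (some o, v) ∧ b = (some v, some o))

def INV (lis : List String) (a : Option Nat × Nat) : Prop :=
  ∀ o f, o < 15 → cycleB.getD o none ≠ none → goB o lis = some f → a.2 ≤ f - o

theorem sync_step (lis : List String) (m : Nat)
    (hL : 1 ≤ lis.length) (hm : m = 1 + (lis.length - 1 + 6) / 7)
    (s : Nat) (hs : s < 15) (a : Option Nat × Nat) (b : Option Nat × Option Nat)
    (h : RelAB m a b) :
    RelAB m (stepA ((List.replicate m cycleB).flatten) lis a s) (stepB lis b s) := by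
  have hm1 : 1 ≤ m := by omega
  have hs15 : s < 15 * m := by nlinarith
  have hmod : s % 15 = s := Nat.mod_eq_of_lt hs
  rw [stepA_eq, AV_char lis m s hs15 hL, hmod]
  unfold stepB
  cases hc : cycleB.getD s none with
  | none => rw [if_pos rfl]; exact h
  | some w =>
    dsimp only
    rw [if_neg (by simp)]
    cases hg : goB s lis with
    | none => exact h
    | some f =>
      dsimp only
      have hs1 : 1 ≤ s := by
        rcases Nat.eq_zero_or_pos s with h0 | h1
        · subst h0; rw [cycle0] at hc; cases hc
        · exact h1
      have hroom : f ≤ 15 * m := by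
        rw [hm]
        exact room lis s f hL (by omega) hg
      rw [if_pos hroom]
      have hfs : f - s < 15 * m := by
        have := (go_spec lis s f hg).1
        omega
      rcases h with ⟨ha, hb⟩ | ⟨o, v, ha, hb⟩
      · subst ha; subst hb
        dsimp only
        rw [if_pos hfs]
        right; exact ⟨s, f - s, rfl, rfl⟩
      · subst ha; subst hb
        dsimp only
        by_cases hlt : f - s < v
        · rw [if_pos hlt, if_pos hlt]
          right; exact ⟨s, f - s, rfl, rfl⟩
        · rw [if_neg hlt, if_neg hlt]
          right; exact ⟨o, v, rfl, rfl⟩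

theorem sync_fold (lis : List String) (m : Nat)
    (hL : 1 ≤ lis.length) (hm : m = 1 + (lis.length - 1 + 6) / 7) :
    ∀ (l : List Nat), (∀ s ∈ l, s < 15) → ∀ a b, RelAB m a b →
      RelAB m (l.foldl (stepA ((List.replicate m cycleB).flatten) lis) a)
        (l.foldl (stepB lis) b) := by
  intro l
  induction l with
  | nil => intro _ a b h; exact h
  | cons s l ih =>
    intro hall a b h
    simp only [List.foldl_cons]
    exact ih (fun t ht => hall t (by simp [ht]))
      _ _ (sync_step lis m hL hm s (hall s (by simp)) a b h)

theorem stepA_mono (lis : List String) (m : Nat) (a : Option Nat × Nat) (s : Nat) :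
    (stepA ((List.replicate m cycleB).flatten) lis a s).2 ≤ a.2 ∧
    (∀ v, AV lis m s = some v → (stepA ((List.replicate m cycleB).flatten) lis a s).2 ≤ v) := by
  rw [stepA_eq]
  cases hav : AV lis m s with
  | none => exact ⟨le_refl _, by intro v hv; cases hv⟩
  | some v =>
    dsimp only
    constructor
    · split_ifs with h
      · exact le_of_lt h
      · exact le_refl _
    · intro v' hv'
      cases hv'
      split_ifs with h
      · exact le_refl _
      · omega

theorem foldA_min (lis : List String) (m : Nat) :
    ∀ (l : List Nat) (a : Option Nat × Nat),
      ((l.foldl (stepA ((List.replicate m cycleB).flatten) lis) a).2 ≤ a.2) ∧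
      (∀ s ∈ l, ∀ v, AV lis m s = some v →
        (l.foldl (stepA ((List.replicate m cycleB).flatten) lis) a).2 ≤ v) := by
  intro l
  induction l with
  | nil => intro a; exact ⟨le_refl _, by intro s hs; cases hs⟩
  | cons s l ih =>
    intro a
    simp only [List.foldl_cons]
    obtain ⟨hmono, hrest⟩ := ih (stepA ((List.replicate m cycleB).flatten) lis a s)
    obtain ⟨hm1, hm2⟩ := stepA_mono lis m a s
    refine ⟨le_trans hmono hm1, ?_⟩
    intro t ht v hv
    rcases List.mem_cons.mp ht with rfl | htl
    · exact le_trans hmono (hm2 v hv)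
    · exact hrest t htl v hv

theorem phase2_step (lis : List String) (m s : Nat)
    (hL : 1 ≤ lis.length) (_hs15 : 15 ≤ s) (hsm : s < 15 * m)
    (a : Option Nat × Nat) (hinv : INV lis a) :
    stepA ((List.replicate m cycleB).flatten) lis a s = a := by
  rw [stepA_eq, AV_char lis m s hsm hL]
  cases hc : cycleB.getD (s % 15) none with
  | none => rfl
  | some w =>
    dsimp only
    cases hg : goB s lis with
    | none => rfl
    | some f =>
      dsimp only
      by_cases hroom : f ≤ 15 * m
      · rw [if_pos hroom]
        have hsplit : s % 15 + 15 * (s / 15) = s := Nat.mod_add_div s 15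
        have hshift := goB_shift_mul lis (s / 15) (s % 15)
        rw [hsplit] at hshift
        rw [hshift] at hg
        cases hg0 : goB (s % 15) lis with
        | none => rw [hg0] at hg; cases hg
        | some f0 =>
          rw [hg0] at hg
          simp only [Option.map_some] at hg
          have hf : f = f0 + 15 * (s / 15) := by
            injection hg with h'
            omega
          have hf0 : s % 15 ≤ f0 := (go_spec lis _ f0 hg0).1
          have hle : a.2 ≤ f0 - s % 15 :=
            hinv (s % 15) f0 (Nat.mod_lt _ (by omega)) (by rw [hc]; simp) hg0
          have hveq : f - s = f0 - s % 15 := by omega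
          rw [hveq]
          dsimp only
          rw [if_neg (by omega)]
      · rw [if_neg hroom]

theorem phase2_fold (lis : List String) (m : Nat) (hL : 1 ≤ lis.length) :
    ∀ (l : List Nat), (∀ s ∈ l, 15 ≤ s ∧ s < 15 * m) → ∀ a, INV lis a →
      l.foldl (stepA ((List.replicate m cycleB).flatten) lis) a = a := by
  intro l
  induction l with
  | nil => intro _ a _; rfl
  | cons s l ih =>
    intro hall a hinv
    simp only [List.foldl_cons]
    rw [phase2_step lis m s hL (hall s (by simp)).1 (hall s (by simp)).2 a hinv]
    exact ih (fun t ht => hall t (by simp [ht])) a hinv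

theorem final (lis : List String) : zzubzzif lis = zzubzzif_alt lis := by
  by_cases h0 : lis.length = 0
  · have he : lis.isEmpty := by
      cases lis
      · rfl
      · simp at h0
    unfold zzubzzif zzubzzif_alt
    rw [if_pos h0, if_pos he]
  · have hL : 1 ≤ lis.length := by omega
    have he : ¬ lis.isEmpty := by
      cases lis
      · simp at h0
      · simp
    unfold zzubzzif zzubzzif_alt
    dsimp only
    rw [fbsBase_eq]
    rw [if_neg h0, if_neg (by simp [he])]
    set L := lis.length with hLdef
    set m := 1 + (L - 1 + 6) / 7 with hm
    have hdiv : 7 * ((L - 1 + 6) / 7) + (L - 1 + 6) % 7 = L - 1 + 6 := Nat.div_add_mod _ 7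
    have hmod7 : (L - 1 + 6) % 7 < 7 := Nat.mod_lt _ (by omega)
    have hbig : L + 14 ≤ 15 * m := by omega
    have hlen : ((List.replicate m cycleB).flatten).length = 15 * m := flatten_len m
    rw [hlen]
    have hS : 15 * m - L + 1 = 15 + (15 * m - L + 1 - 15) := by omega
    rw [hS, List.range_add]
    rw [List.foldl_append]
    set a15 := (List.range 15).foldl
      (stepA ((List.replicate m cycleB).flatten) lis) (none, 15 * m) with ha15
    set b15 := (List.range 15).foldl (stepB lis) (none, none) with hb15
    have hrel : RelAB m a15 b15 := by
      rw [ha15, hb15]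
      exact sync_fold lis m hL hm (List.range 15)
        (fun s hs => List.mem_range.mp hs) _ _ (Or.inl ⟨rfl, rfl⟩)
    have hinv : INV lis a15 := by
      intro o f ho hnone hg
      have hs15 : o < 15 * m := by omega
      have hAV : AV lis m o = some (f - o) := by
        rw [AV_char lis m o hs15 hL, Nat.mod_eq_of_lt ho]
        cases hc : cycleB.getD o none with
        | none => exact absurd hc hnone
        | some w =>
          dsimp only
          rw [hg]
          dsimp only
          rw [if_pos (by rw [hm]; exact room lis o f hL (by omega) hg)]
      exact (foldA_min lis m (List.range 15) (none, 15 * m)).2 o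
        (List.mem_range.mpr ho) (f - o) hAV
    have hph2 : (List.map (fun x => 15 + x) (List.range (15 * m - L + 1 - 15))).foldl
        (stepA ((List.replicate m cycleB).flatten) lis) a15 = a15 := by
      apply phase2_fold lis m hL
      · intro s hs
        obtain ⟨k, hk, rfl⟩ := List.mem_map.mp hs
        have := List.mem_range.mp hk
        omega
      · exact hinv
    rw [hph2]
    rcases hrel with ⟨ha, hb⟩ | ⟨o, v, ha, hb⟩
    · rw [ha, hb]
    · rw [ha, hb]

-- ===== VERDICT (by name: the statement is the Claim_ definition above) =====
theorem zzubzzif_spec : Claim_equal_zzubzzif := by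
  intro lis _
  show zzubzzif lis = zzubzzif_alt lis
  exact final lis
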